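-- pv_equiv track=rewrite | github.com/datagen24/cowrieprocessor | cowrieprocessor/loader/bulk.py | _neutralize_command
-- ===== SOURCE A (Python) =====
-- def _neutralize_command(command: str) -> str:
--     sanitized = command
--     for pattern in ("http://", "https://"):
--         sanitized = sanitized.replace(pattern, "[URL]")
--     sanitized = sanitized.replace(";", " [SC] ")
--     sanitized = sanitized.replace("&&", " [AND] ")
--     sanitized = sanitized.replace("|", " [PIPE] ")
--     return " ".join(part for part in sanitized.split() if part)
-- ===== SOURCE B (Python) =====
-- def _neutralize_command(command: str) -> str:
--     # single left-to-right pass: emit the marker for the first token matching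
--     # at the current position, otherwise copy the character
--     out = []
--     i = 0
--     n = len(command)
--     while i < n:
--         if command.startswith("http://", i):
--             out.append("[URL]")
--             i += 7
--         elif command.startswith("https://", i):
--             out.append("[URL]")
--             i += 8
--         elif command[i] == ";":
--             out.append(" [SC] ")
--             i += 1
--         elif command.startswith("&&", i):
--             out.append(" [AND] ")
--             i += 2
--         elif command[i] == "|":
--             out.append(" [PIPE] ")
--             i += 1
--         else:
--             out.append(command[i])
--             i += 1
--     return " ".join("".join(out).split())
-- ===== Notes on version B (the rewrite author's own statement) =====
-- stated objective: alternative
-- what changed: Replaces the five chained full-string str.replace passes by a single left-to-right scan that matches the tokens (http://, https://, ;, &&, |) at each position and emits the marker or copies the character, then the same split/join normalization.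
import Mathlib
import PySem

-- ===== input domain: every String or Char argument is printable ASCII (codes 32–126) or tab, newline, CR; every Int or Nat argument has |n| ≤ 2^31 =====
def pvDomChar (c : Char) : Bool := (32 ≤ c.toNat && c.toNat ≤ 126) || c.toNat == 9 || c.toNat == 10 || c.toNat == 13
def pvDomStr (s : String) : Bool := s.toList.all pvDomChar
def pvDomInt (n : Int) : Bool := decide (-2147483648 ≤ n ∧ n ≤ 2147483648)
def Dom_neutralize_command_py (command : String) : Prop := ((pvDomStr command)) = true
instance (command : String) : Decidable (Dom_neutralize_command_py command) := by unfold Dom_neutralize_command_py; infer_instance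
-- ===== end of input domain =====

-- B replaces A's five chained full-string str.replace passes by one left-to-right scan
-- that matches each token at the current position (objective: alternative, same cost class).

-- ===== PORT A =====
def neutralize_command_py (command : String) : String :=
  let sanitized := command
  let sanitized := PySem.Str.replace sanitized "http://" "[URL]"
  let sanitized := PySem.Str.replace sanitized "https://" "[URL]"
  let sanitized := PySem.Str.replace sanitized ";" " [SC] "
  let sanitized := PySem.Str.replace sanitized "&&" " [AND] "
  let sanitized := PySem.Str.replace sanitized "|" " [PIPE] "
  PySem.Str.join " " ((PySem.Str.split₀ sanitized).filter (fun part => part ≠ ""))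

-- ===== PORT B =====
-- the tokens and their markers, as char lists (B scans character by character)
def tokHttp : List Char := ['h', 't', 't', 'p', ':', '/', '/']
def tokHttps : List Char := ['h', 't', 't', 'p', 's', ':', '/', '/']
def tokAnd : List Char := ['&', '&']
def repUrl : List Char := ['[', 'U', 'R', 'L', ']']
def repSC : List Char := [' ', '[', 'S', 'C', ']', ' ']
def repAnd : List Char := [' ', '[', 'A', 'N', 'D', ']', ' ']
def repPipe : List Char := [' ', '[', 'P', 'I', 'P', 'E', ']', ' ']

-- the single left-to-right pass of Source B (the while loop over positions)
def nscan : List Char → List Char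
  | [] => []
  | c :: t =>
    if tokHttp.isPrefixOf (c :: t) then repUrl ++ nscan ((c :: t).drop 7)
    else if tokHttps.isPrefixOf (c :: t) then repUrl ++ nscan ((c :: t).drop 8)
    else if c = ';' then repSC ++ nscan t
    else if tokAnd.isPrefixOf (c :: t) then repAnd ++ nscan ((c :: t).drop 2)
    else if c = '|' then repPipe ++ nscan t
    else c :: nscan t
termination_by l => l.length
decreasing_by all_goals (simp [List.length_drop]; try omega)

def neutralize_command_py_alt (command : String) : String :=
  PySem.Str.join " " (PySem.Str.split₀ (String.ofList (nscan command.toList)))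

-- ===== PRECONDITION & SPEC =====
def Spec_neutralize_command_py (command : String) (out : String) : Prop := out = neutralize_command_py_alt command
instance (command : String) (out : String) : Decidable (Spec_neutralize_command_py command out) := by unfold Spec_neutralize_command_py; infer_instance

-- ===== CLAIM (what is proved, stated in full; the proofs are below) =====
def Claim_equal_neutralize_command_py : Prop := ∀ (command : String), Dom_neutralize_command_py command → Spec_neutralize_command_py command (neutralize_command_py command)

-- ===== LEMMAS AND PROOFS =====

theorem cons_isPrefixOf_cons (a b : Char) (as bs : List Char) :
    (a :: as).isPrefixOf (b :: bs) = (a == b && as.isPrefixOf bs) := rfl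

-- fuel-indexed reformulation of PySem.Chars.replace.go without the reversed accumulator
def repF (old new : List Char) : Nat → List Char → List Char
  | _, [] => []
  | 0, l => l
  | (fuel+1), (c :: t) =>
    if old.isPrefixOf (c :: t) then new ++ repF old new fuel ((c :: t).drop old.length)
    else c :: repF old new fuel t

theorem go_eq_repF (old new : List Char) :
    ∀ (fuel : Nat) (l acc : List Char),
      PySem.Chars.replace.go old new fuel l acc = acc.reverse ++ repF old new fuel l := by
  intro fuel
  induction fuel with
  | zero =>
    intro l acc
    rw [PySem.Chars.replace.go.eq_def]
    cases l <;> simp [repF]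
  | succ fuel ih =>
    intro l acc
    cases l with
    | nil => rw [PySem.Chars.replace.go.eq_def]; simp [repF]
    | cons c t =>
      rw [PySem.Chars.replace.go.eq_def]
      by_cases h : old.isPrefixOf (c :: t) <;>
        simp [h, repF, ih, List.append_assoc]

theorem replace_eq_repF (s old new : List Char) (h : old ≠ []) :
    PySem.Chars.replace s old new = repF old new s.length s := by
  have hne : old.isEmpty = false := by simp [h]
  simp [PySem.Chars.replace, hne, go_eq_repF]

theorem repF_congr (old new : List Char) (h : old ≠ []) :
    ∀ (n : Nat) (l : List Char) (f₁ f₂ : Nat), l.length ≤ n → l.length ≤ f₁ → l.length ≤ f₂ →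
      repF old new f₁ l = repF old new f₂ l := by
  have hol : 1 ≤ old.length := List.length_pos_iff.mpr h
  intro n
  induction n with
  | zero =>
    intro l f₁ f₂ hn _ _
    have : l = [] := List.eq_nil_of_length_eq_zero (by omega)
    subst this
    simp [repF]
  | succ n ih =>
    intro l f₁ f₂ hn h1 h2
    cases l with
    | nil => simp [repF]
    | cons c t =>
      simp only [List.length_cons] at hn h1 h2
      cases f₁ with
      | zero => omega
      | succ a =>
        cases f₂ with
        | zero => omega
        | succ b =>
          by_cases hp : old.isPrefixOf (c :: t)
          · simp only [repF, hp, if_pos]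
            exact congrArg (new ++ ·) (ih _ a b (by simp [List.length_drop]; omega)
              (by simp [List.length_drop]; omega) (by simp [List.length_drop]; omega))
          · simp only [repF, hp]
            exact congrArg (c :: ·) (ih t a b (by omega) (by omega) (by omega))

-- canonical (fuel = length) replace
def pyRep (old new l : List Char) : List Char := repF old new l.length l

theorem Rep_nil (old new : List Char) : pyRep old new [] = [] := by
  simp [pyRep, repF]

theorem replace_eq_Rep (s old new : List Char) (h : old ≠ []) :
    PySem.Chars.replace s old new = pyRep old new s := by
  exact replace_eq_repF s old new h

theorem Rep_match (old new l : List Char) (h : old ≠ []) (hp : old.isPrefixOf l = true) :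
    pyRep old new l = new ++ pyRep old new (l.drop old.length) := by
  have hol : 1 ≤ old.length := List.length_pos_iff.mpr h
  cases l with
  | nil =>
    simp [List.isPrefixOf_iff_prefix] at hp
    exact absurd hp h
  | cons c t =>
    show repF old new (t.length + 1) (c :: t) = _
    simp only [repF, hp, if_pos]
    congr 1
    apply repF_congr old new h ((List.drop old.length (c :: t)).length)
    · rfl
    · simp [List.length_drop]; omega
    · rfl

theorem Rep_nomatch (old new : List Char) (c : Char) (t : List Char)
    (hp : ¬ old.isPrefixOf (c :: t) = true) :
    pyRep old new (c :: t) = c :: pyRep old new t := by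
  show repF old new (t.length + 1) (c :: t) = _
  simp only [repF, hp]
  rfl

theorem Rep_head (o : Char) (os new : List Char) (c : Char) (t : List Char) (hc : c ≠ o) :
    pyRep (o :: os) new (c :: t) = c :: pyRep (o :: os) new t := by
  apply Rep_nomatch
  simp [cons_isPrefixOf_cons]
  intro h
  exact absurd h.symm hc

theorem Rep_pass (o : Char) (os new p x : List Char) (hp : o ∉ p) :
    pyRep (o :: os) new (p ++ x) = p ++ pyRep (o :: os) new x := by
  induction p with
  | nil => simp
  | cons a p' ih =>
    simp only [List.mem_cons, not_or] at hp
    rw [List.cons_append, Rep_head o os new a _ (fun hh => hp.1 hh.symm), ih hp.2]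
    rfl

-- replacing cannot create a fresh prefix p as long as p avoids the marker's first char
theorem Rep_guard (o : Char) (os : List Char) (n : Char) (ns : List Char) :
    ∀ (N : Nat) (l p : List Char), l.length ≤ N → n ∉ p → ¬ p.isPrefixOf l = true →
      ¬ p.isPrefixOf (pyRep (o :: os) (n :: ns) l) = true := by
  intro N
  induction N with
  | zero =>
    intro l p hl hn hpre
    have : l = [] := List.eq_nil_of_length_eq_zero (by omega)
    subst this
    cases p with
    | nil => simp at hpre
    | cons p0 p' => rw [Rep_nil]; simp
  | succ N ih =>
    intro l p hl hn hpre
    cases l with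
    | nil =>
      cases p with
      | nil => simp at hpre
      | cons p0 p' => rw [Rep_nil]; simp
    | cons c t =>
      by_cases hm : (o :: os).isPrefixOf (c :: t)
      · rw [Rep_match _ _ _ (by simp) hm]
        cases p with
        | nil => simp at hpre
        | cons p0 p' =>
          simp only [List.mem_cons, not_or] at hn
          intro hcon
          rw [List.cons_append] at hcon
          simp only [cons_isPrefixOf_cons, Bool.and_eq_true, beq_iff_eq] at hcon
          exact hn.1 hcon.1.symm
      · rw [Rep_nomatch _ _ _ _ hm]
        cases p with
        | nil => simp at hpre
        | cons p0 p' =>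
          intro hcon
          simp only [cons_isPrefixOf_cons, Bool.and_eq_true, beq_iff_eq] at hcon
          obtain ⟨he', hpr⟩ := hcon
          subst he'
          rw [cons_isPrefixOf_cons] at hpre
          simp only [BEq.rfl, Bool.true_and] at hpre
          simp only [List.mem_cons, not_or] at hn
          exact ih t p' (by simpa using Nat.le_of_succ_le_succ (by simpa using hl)) hn.2 hpre hpr

-- specializations of Rep_pass / Rep_head to the five passes
theorem pass1 (p x : List Char) (hp : 'h' ∉ p) :
    pyRep tokHttp repUrl (p ++ x) = p ++ pyRep tokHttp repUrl x :=
  Rep_pass 'h' ['t', 't', 'p', ':', '/', '/'] repUrl p x hp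

theorem pass2 (p x : List Char) (hp : 'h' ∉ p) :
    pyRep tokHttps repUrl (p ++ x) = p ++ pyRep tokHttps repUrl x :=
  Rep_pass 'h' ['t', 't', 'p', 's', ':', '/', '/'] repUrl p x hp

theorem pass3 (p x : List Char) (hp : ';' ∉ p) :
    pyRep [';'] repSC (p ++ x) = p ++ pyRep [';'] repSC x :=
  Rep_pass ';' [] repSC p x hp

theorem pass4 (p x : List Char) (hp : '&' ∉ p) :
    pyRep tokAnd repAnd (p ++ x) = p ++ pyRep tokAnd repAnd x :=
  Rep_pass '&' ['&'] repAnd p x hp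

theorem pass5 (p x : List Char) (hp : '|' ∉ p) :
    pyRep ['|'] repPipe (p ++ x) = p ++ pyRep ['|'] repPipe x :=
  Rep_pass '|' [] repPipe p x hp

theorem head1 (c : Char) (t : List Char) (hc : c ≠ 'h') :
    pyRep tokHttp repUrl (c :: t) = c :: pyRep tokHttp repUrl t :=
  Rep_head 'h' ['t', 't', 'p', ':', '/', '/'] repUrl c t hc

theorem head2 (c : Char) (t : List Char) (hc : c ≠ 'h') :
    pyRep tokHttps repUrl (c :: t) = c :: pyRep tokHttps repUrl t :=
  Rep_head 'h' ['t', 't', 'p', 's', ':', '/', '/'] repUrl c t hc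

theorem head3 (c : Char) (t : List Char) (hc : c ≠ ';') :
    pyRep [';'] repSC (c :: t) = c :: pyRep [';'] repSC t :=
  Rep_head ';' [] repSC c t hc

theorem head4 (c : Char) (t : List Char) (hc : c ≠ '&') :
    pyRep tokAnd repAnd (c :: t) = c :: pyRep tokAnd repAnd t :=
  Rep_head '&' ['&'] repAnd c t hc

theorem head5 (c : Char) (t : List Char) (hc : c ≠ '|') :
    pyRep ['|'] repPipe (c :: t) = c :: pyRep ['|'] repPipe t :=
  Rep_head '|' [] repPipe c t hc

-- the five passes, composed, equal the single scan
theorem chain_eq_nscan :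
    ∀ (N : Nat) (l : List Char), l.length ≤ N →
      pyRep ['|'] repPipe (pyRep tokAnd repAnd (pyRep [';'] repSC
        (pyRep tokHttps repUrl (pyRep tokHttp repUrl l)))) = nscan l := by
  intro N
  induction N with
  | zero =>
    intro l hl
    have : l = [] := List.eq_nil_of_length_eq_zero (by omega)
    subst this
    simp [Rep_nil, nscan]
  | succ N ih =>
    intro l hl
    cases l with
    | nil => simp [Rep_nil, nscan]
    | cons c t =>
      simp only [List.length_cons] at hl
      by_cases h1 : tokHttp.isPrefixOf (c :: t)
      · -- "http://" matches here
        rw [Rep_match tokHttp repUrl _ (by decide) h1]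
        rw [show tokHttp.length = 7 from rfl]
        rw [pass2 repUrl _ (by decide), pass3 repUrl _ (by decide),
            pass4 repUrl _ (by decide), pass5 repUrl _ (by decide)]
        rw [ih _ (by simp only [List.length_drop, List.length_cons]; omega)]
        conv_rhs => rw [nscan]
        rw [if_pos h1]
      · by_cases h2 : tokHttps.isPrefixOf (c :: t)
        · -- "https://" matches here
          obtain ⟨u, hu⟩ := List.isPrefixOf_iff_prefix.mp h2
          have hct : c = 'h' ∧ t = ['t', 't', 'p', 's', ':', '/', '/'] ++ u := by
            have := hu.symm
            simp only [tokHttps, List.cons_append, List.cons.injEq] at this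
            exact this
          obtain ⟨hc, ht⟩ := hct
          subst hc; subst ht
          rw [Rep_nomatch tokHttp repUrl 'h' _ h1]
          rw [pass1 ['t', 't', 'p', 's', ':', '/', '/'] u (by decide)]
          rw [show ('h' : Char) :: (['t', 't', 'p', 's', ':', '/', '/'] ++ pyRep tokHttp repUrl u)
                = tokHttps ++ pyRep tokHttp repUrl u from rfl]
          rw [Rep_match tokHttps repUrl _ (by decide)
                (List.isPrefixOf_iff_prefix.mpr ⟨_, rfl⟩)]
          rw [List.drop_left]
          rw [pass3 repUrl _ (by decide), pass4 repUrl _ (by decide), pass5 repUrl _ (by decide)]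
          rw [ih u (by simp only [List.length_append, List.length_cons] at hl ⊢; omega)]
          conv_rhs => rw [nscan]
          rw [if_neg h1, if_pos h2]
          rfl
        · by_cases hsc : c = ';'
          · -- ";" here
            subst hsc
            rw [head1 _ _ (by decide), head2 _ _ (by decide)]
            rw [Rep_match [';'] repSC
                  (';' :: pyRep tokHttps repUrl (pyRep tokHttp repUrl t)) (by decide)
                  (List.isPrefixOf_iff_prefix.mpr ⟨_, rfl⟩)]
            rw [show ([';'] : List Char).length = 1 from rfl, List.drop_one, List.tail_cons]
            rw [pass4 repSC _ (by decide), pass5 repSC _ (by decide)]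
            rw [ih t (by omega)]
            conv_rhs => rw [nscan]
            rw [if_neg h1, if_neg h2, if_pos rfl]
          · by_cases h4 : tokAnd.isPrefixOf (c :: t)
            · -- "&&" here
              obtain ⟨u, hu⟩ := List.isPrefixOf_iff_prefix.mp h4
              have hct : c = '&' ∧ t = '&' :: u := by
                have := hu.symm
                simp only [tokAnd, List.cons_append, List.nil_append, List.cons.injEq] at this
                exact ⟨this.1, this.2⟩
              obtain ⟨hc, ht⟩ := hct
              subst hc; subst ht
              rw [head1 _ _ (by decide), head1 _ _ (by decide),
                  head2 _ _ (by decide), head2 _ _ (by decide),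
                  head3 _ _ (by decide), head3 _ _ (by decide)]
              rw [Rep_match tokAnd repAnd
                    ('&' :: '&' :: pyRep [';'] repSC (pyRep tokHttps repUrl (pyRep tokHttp repUrl u)))
                    (by decide) (List.isPrefixOf_iff_prefix.mpr ⟨_, rfl⟩)]
              rw [show tokAnd.length = 2 from rfl]
              rw [show (('&' : Char) :: '&' :: pyRep [';'] repSC (pyRep tokHttps repUrl
                    (pyRep tokHttp repUrl u))).drop 2
                  = pyRep [';'] repSC (pyRep tokHttps repUrl (pyRep tokHttp repUrl u)) from rfl]
              rw [pass5 repAnd _ (by decide)]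
              rw [ih u (by simp only [List.length_cons] at hl; omega)]
              conv_rhs => rw [nscan]
              rw [if_neg h1, if_neg h2, if_neg (by decide), if_pos h4]
              rfl
            · by_cases hpi : c = '|'
              · -- "|" here
                subst hpi
                rw [head1 _ _ (by decide), head2 _ _ (by decide), head3 _ _ (by decide),
                    head4 _ _ (by decide)]
                rw [Rep_match ['|'] repPipe
                    ('|' :: pyRep tokAnd repAnd (pyRep [';'] repSC (pyRep tokHttps repUrl
                      (pyRep tokHttp repUrl t)))) (by decide)
                    (List.isPrefixOf_iff_prefix.mpr ⟨_, rfl⟩)]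
                rw [show (['|'] : List Char).length = 1 from rfl, List.drop_one, List.tail_cons]
                rw [ih t (by omega)]
                conv_rhs => rw [nscan]
                rw [if_neg h1, if_neg h2, if_neg (by decide),
                    if_neg h4, if_pos rfl]
              · -- no token matches at this position: copy c
                rw [Rep_nomatch tokHttp repUrl c t h1]
                have hn2 : ¬ tokHttps.isPrefixOf (c :: pyRep tokHttp repUrl t) = true := by
                  by_cases hch : c = 'h'
                  · subst hch
                    have h2' : ¬ (['t', 't', 'p', 's', ':', '/', '/'] : List Char).isPrefixOf t = true := by
                      intro hb
                      exact h2 (by simp [tokHttps, hb])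
                    have := Rep_guard 'h' ['t', 't', 'p', ':', '/', '/'] '[' ['U', 'R', 'L', ']']
                      t.length t ['t', 't', 'p', 's', ':', '/', '/'] le_rfl (by decide) h2'
                    simp only [tokHttps, cons_isPrefixOf_cons, beq_self_eq_true, Bool.true_and]
                    exact this
                  · intro hb
                    simp only [tokHttps, cons_isPrefixOf_cons, Bool.and_eq_true, beq_iff_eq] at hb
                    exact hch hb.1.symm
                rw [Rep_nomatch tokHttps repUrl c _ hn2]
                rw [head3 c _ hsc]
                have hn4 : ¬ tokAnd.isPrefixOf
                    (c :: pyRep [';'] repSC (pyRep tokHttps repUrl (pyRep tokHttp repUrl t))) = true := by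
                  by_cases hca : c = '&'
                  · subst hca
                    have h4' : ¬ (['&'] : List Char).isPrefixOf t = true := by
                      intro hb
                      exact h4 (by simp [tokAnd, hb])
                    have g1 := Rep_guard 'h' ['t', 't', 'p', ':', '/', '/'] '[' ['U', 'R', 'L', ']']
                      t.length t ['&'] le_rfl (by decide) h4'
                    have g2 := Rep_guard 'h' ['t', 't', 'p', 's', ':', '/', '/'] '[' ['U', 'R', 'L', ']']
                      (pyRep tokHttp repUrl t).length (pyRep tokHttp repUrl t) ['&'] le_rfl (by decide) g1
                    have g3 := Rep_guard ';' [] ' ' ['[', 'S', 'C', ']', ' ']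
                      (pyRep tokHttps repUrl (pyRep tokHttp repUrl t)).length
                      (pyRep tokHttps repUrl (pyRep tokHttp repUrl t)) ['&'] le_rfl (by decide) g2
                    simp only [tokAnd, cons_isPrefixOf_cons, beq_self_eq_true, Bool.true_and]
                    exact g3
                  · intro hb
                    simp only [tokAnd, cons_isPrefixOf_cons, Bool.and_eq_true, beq_iff_eq] at hb
                    exact hca hb.1.symm
                rw [Rep_nomatch tokAnd repAnd c _ hn4]
                rw [head5 c _ hpi]
                rw [ih t (by omega)]
                conv_rhs => rw [nscan]
                rw [if_neg h1, if_neg h2, if_neg hsc, if_neg h4, if_neg hpi]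

theorem split₀go_ne_nil :
    ∀ (l cur : List Char) (acc : List (List Char)), (∀ x ∈ acc, x ≠ []) →
      ∀ x ∈ PySem.Chars.split₀.go l cur acc, x ≠ [] := by
  intro l
  induction l with
  | nil =>
    intro cur acc hacc x hx
    rw [PySem.Chars.split₀.go.eq_def] at hx
    by_cases hc : cur.isEmpty
    · simp only [hc, if_pos, List.mem_reverse] at hx
      exact hacc x hx
    · simp only [hc, Bool.false_eq_true, if_neg, not_false_iff, List.mem_reverse,
        List.mem_cons] at hx
      rcases hx with hx | hx
      · subst hx
        simp only [ne_eq, List.reverse_eq_nil_iff]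
        intro h
        subst h
        simp at hc
      · exact hacc x hx
  | cons c rest ih =>
    intro cur acc hacc x hx
    rw [PySem.Chars.split₀.go.eq_def] at hx
    by_cases hs : PySem.Chars.isspace c
    · by_cases hc : cur.isEmpty
      · simp only [hs, hc, if_pos] at hx
        exact ih [] acc hacc x hx
      · simp only [hs, hc, Bool.false_eq_true, if_neg, not_false_iff, if_pos] at hx
        refine ih [] _ ?_ x hx
        intro y hy
        rcases List.mem_cons.mp hy with hy | hy
        · subst hy
          simp only [ne_eq, List.reverse_eq_nil_iff]
          intro h
          subst h
          simp at hc
        · exact hacc y hy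
    · simp only [hs, Bool.false_eq_true, if_neg, not_false_iff] at hx
      exact ih (c :: cur) acc hacc x hx

theorem split₀_ne_empty (s : String) : ∀ p ∈ PySem.Str.split₀ s, p ≠ "" := by
  intro p hp
  obtain ⟨x, hx, hox⟩ := List.mem_map.mp hp
  have hxne : x ≠ [] := split₀go_ne_nil s.toList [] [] (by simp) x hx
  intro he
  apply hxne
  have : (String.ofList x).toList = ("" : String).toList := by rw [hox, he]
  simpa [String.toList_ofList] using this

-- ===== VERDICT (by name: the statement is the Claim_ definition above) =====
theorem neutralize_command_py_spec : Claim_equal_neutralize_command_py := by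
  intro command _
  unfold Spec_neutralize_command_py neutralize_command_py neutralize_command_py_alt
  show PySem.Str.join " " (List.filter (fun part => decide (part ≠ ""))
      (PySem.Str.split₀ (PySem.Str.replace (PySem.Str.replace (PySem.Str.replace
        (PySem.Str.replace (PySem.Str.replace command "http://" "[URL]") "https://" "[URL]")
        ";" " [SC] ") "&&" " [AND] ") "|" " [PIPE] ")))
    = PySem.Str.join " " (PySem.Str.split₀ (String.ofList (nscan command.toList)))
  rw [List.filter_eq_self.mpr (fun p hp => by simpa using split₀_ne_empty _ p hp)]
  have key : (PySem.Str.replace (PySem.Str.replace (PySem.Str.replace (PySem.Str.replace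
      (PySem.Str.replace command "http://" "[URL]") "https://" "[URL]") ";" " [SC] ")
      "&&" " [AND] ") "|" " [PIPE] ") = String.ofList (nscan command.toList) := by
    apply String.toList_inj.mp
    rw [PySem.Str.toList_replace, PySem.Str.toList_replace, PySem.Str.toList_replace,
        PySem.Str.toList_replace, PySem.Str.toList_replace]
    rw [replace_eq_Rep _ _ _ (by decide), replace_eq_Rep _ _ _ (by decide),
        replace_eq_Rep _ _ _ (by decide), replace_eq_Rep _ _ _ (by decide),
        replace_eq_Rep _ _ _ (by decide)]
    rw [show "http://".toList = tokHttp from by decide,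
        show "https://".toList = tokHttps from by decide,
        show ";".toList = [';'] from by decide,
        show "&&".toList = tokAnd from by decide,
        show "|".toList = ['|'] from by decide,
        show "[URL]".toList = repUrl from by decide,
        show " [SC] ".toList = repSC from by decide,
        show " [AND] ".toList = repAnd from by decide,
        show " [PIPE] ".toList = repPipe from by decide]
    rw [String.toList_ofList]
    exact chain_eq_nscan command.toList.length command.toList le_rfl
  rw [key]
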